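-- pv_equiv track=rewrite | github.com/smrutid12/Smart-doc-string-generator | backend/app/utils.py | indent_docstring
-- ===== SOURCE A (Python) =====
-- def indent_docstring(docstring: str, indent: str) -> str:
--     """Indent all lines of the docstring according to the function indentation."""
--     lines = docstring.split("\n")
--     if not lines:
--         return docstring
--
--     # First line stays right after the triple quotes
--     formatted = [lines[0]]
--
--     # Remaining lines get indentation
--     for line in lines[1:]:
--         formatted.append(indent + line)
--     return "\n".join(formatted)
-- ===== SOURCE B (Python) =====
-- def indent_docstring(docstring: str, indent: str) -> str:
--     """Indent all lines of the docstring according to the function indentation."""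
--     return docstring.replace("\n", "\n" + indent)
-- ===== Notes on version B (the rewrite author's own statement) =====
-- stated objective: idiomatic
-- what changed: Replaces the split-into-lines / first-line-special-case / accumulator-loop / join pipeline by a single str.replace of every newline with newline+indent.
import Mathlib
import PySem

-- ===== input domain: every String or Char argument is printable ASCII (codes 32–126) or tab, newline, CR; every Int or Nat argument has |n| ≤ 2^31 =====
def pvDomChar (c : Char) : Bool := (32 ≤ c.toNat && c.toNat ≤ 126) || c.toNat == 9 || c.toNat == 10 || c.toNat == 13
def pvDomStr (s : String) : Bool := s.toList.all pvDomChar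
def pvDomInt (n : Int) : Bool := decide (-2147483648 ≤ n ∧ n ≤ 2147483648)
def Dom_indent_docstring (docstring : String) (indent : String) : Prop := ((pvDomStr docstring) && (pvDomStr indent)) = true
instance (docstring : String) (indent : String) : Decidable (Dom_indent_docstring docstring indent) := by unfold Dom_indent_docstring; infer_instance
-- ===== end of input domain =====

-- B replaces A's split / first-line special case / accumulator loop / join by one str.replace; same result, same cost.

-- ===== PORT A =====
-- A: lines = docstring.split("\n"); if not lines: return docstring;
--    formatted = [lines[0]]; for line in lines[1:]: formatted.append(indent + line); return "\n".join(formatted)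
def indent_docstring (docstring : String) (indent : String) : String :=
  let lines := PySem.Chars.splitOn docstring.toList "\n".toList
  match lines with
  | [] => docstring
  | l0 :: _ =>
    let formatted :=
      (PySem.List.slice lines (some 1) none).foldl
        (fun acc line => acc ++ [indent.toList ++ line]) [l0]
    String.ofList (PySem.Chars.join "\n".toList formatted)

-- ===== PORT B =====
def indent_docstring_alt (docstring : String) (indent : String) : String :=
  PySem.Str.replace docstring "\n" ("\n" ++ indent)

-- ===== PRECONDITION & SPEC =====
def Spec_indent_docstring (docstring : String) (indent : String) (out : String) : Prop := out = indent_docstring_alt docstring indent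
instance (docstring : String) (indent : String) (out : String) : Decidable (Spec_indent_docstring docstring indent out) := by unfold Spec_indent_docstring; infer_instance

-- ===== CLAIM (what is proved, stated in full; the proofs are below) =====
def Claim_equal_indent_docstring : Prop := ∀ (docstring : String) (indent : String), Dom_indent_docstring docstring indent → Spec_indent_docstring docstring indent (indent_docstring docstring indent)

-- ===== LEMMAS AND PROOFS =====

-- first segment (up to the first '\n') and the remaining segments of a char list
def pvSegs : List Char → List Char × List (List Char)
  | [] => ([], [])
  | c :: t =>
    let r := pvSegs t
    if c = '\n' then ([], r.1 :: r.2) else (c :: r.1, r.2)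

theorem pvSplitOn_go_eq (fuel : Nat) :
    ∀ (l cur : List Char) (accs : List (List Char)), l.length < fuel →
      PySem.Chars.splitOn.go ['\n'] fuel l cur accs
        = accs.reverse ++ (cur.reverse ++ (pvSegs l).1) :: (pvSegs l).2 := by
  induction fuel with
  | zero => intro l cur accs h; omega
  | succ n ih =>
    intro l cur accs h
    cases l with
    | nil => simp [PySem.Chars.splitOn.go, pvSegs]
    | cons c t =>
      simp only [PySem.Chars.splitOn.go, List.isPrefixOf]
      by_cases hc : c = '\n'
      · subst hc
        rw [if_pos (by simp), show List.drop ['\n'].length ('\n' :: t) = t from rfl]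
        rw [ih t [] ((cur.reverse) :: accs) (by simpa using Nat.lt_of_succ_lt_succ h)]
        simp [pvSegs]
      · rw [if_neg (by simp; exact fun hh => hc hh.symm)]
        rw [ih t (c :: cur) accs (by simpa using Nat.lt_of_succ_lt_succ h)]
        simp [pvSegs, if_neg hc]

theorem pvSplitOn_eq (s : List Char) :
    PySem.Chars.splitOn s ['\n'] = (pvSegs s).1 :: (pvSegs s).2 := by
  unfold PySem.Chars.splitOn
  rw [pvSplitOn_go_eq (s.length + 1) s [] [] (Nat.lt_succ_self _)]
  simp

theorem pvReplace_go_eq (new : List Char) (fuel : Nat) :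
    ∀ (l acc : List Char), l.length ≤ fuel →
      PySem.Chars.replace.go ['\n'] new fuel l acc
        = acc.reverse ++ l.flatMap (fun c => if c = '\n' then new else [c]) := by
  induction fuel with
  | zero =>
    intro l acc h
    have : l = [] := List.length_eq_zero_iff.mp (Nat.le_zero.mp h)
    subst this; simp [PySem.Chars.replace.go]
  | succ n ih =>
    intro l acc h
    cases l with
    | nil => simp [PySem.Chars.replace.go]
    | cons c t =>
      simp only [PySem.Chars.replace.go, List.isPrefixOf]
      by_cases hc : c = '\n'
      · subst hc
        rw [if_pos (by simp), show List.drop ['\n'].length ('\n' :: t) = t from rfl]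
        rw [ih t (new.reverse ++ acc) (by simpa using Nat.le_of_succ_le_succ h)]
        simp
      · rw [if_neg (by simp; exact fun hh => hc hh.symm)]
        rw [ih t (c :: acc) (by simpa using Nat.le_of_succ_le_succ h)]
        simp [if_neg hc]

theorem pvReplace_eq (s new : List Char) :
    PySem.Chars.replace s ['\n'] new
      = s.flatMap (fun c => if c = '\n' then new else [c]) := by
  unfold PySem.Chars.replace
  rw [if_neg (by simp)]
  rw [pvReplace_go_eq new s.length s [] le_rfl]
  simp

theorem pvFoldl_append_map {α β : Type} (f : α → β) :
    ∀ (l : List α) (init : List β),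
      l.foldl (fun acc x => acc ++ [f x]) init = init ++ l.map f := by
  intro l
  induction l with
  | nil => simp
  | cons x t ih => intro init; simp [List.foldl_cons, ih, List.append_assoc]

theorem pvJoin_cons (x : List Char) (ys : List (List Char)) :
    PySem.Chars.join ['\n'] (x :: ys)
      = x ++ ys.flatMap (fun y => '\n' :: y) := by
  induction ys generalizing x with
  | nil => simp [PySem.Chars.join, List.intercalate]
  | cons y t ih =>
    simp only [PySem.Chars.join, List.intercalate] at *
    simp [List.intersperse] at *
    simp [ih y]

theorem pvMain (ind : List Char) (l : List Char) :
    (pvSegs l).1 ++ ((pvSegs l).2.map (fun y => ind ++ y)).flatMap (fun y => '\n' :: y)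
      = l.flatMap (fun c => if c = '\n' then '\n' :: (ind ++ []) else [c]) := by
  induction l with
  | nil => simp [pvSegs]
  | cons c t ih =>
    by_cases hc : c = '\n'
    · subst hc
      simp only [pvSegs, List.flatMap_cons]
      rw [← ih]
      simp
    · simp [pvSegs, if_neg hc, ih]

-- ===== VERDICT (by name: the statement is the Claim_ definition above) =====
theorem indent_docstring_spec : Claim_equal_indent_docstring := by
  intro docstring indent _
  unfold Spec_indent_docstring indent_docstring indent_docstring_alt
  simp only [PySem.Str.replace, show ("\n" : String).toList = ['\n'] from rfl]
  rw [pvSplitOn_eq, pvReplace_eq]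
  dsimp only
  have hs : PySem.List.slice ((pvSegs docstring.toList).1 :: (pvSegs docstring.toList).2) (some 1) none = (pvSegs docstring.toList).2 := by
    rw [PySem.List.slice_from _ (by norm_num : (0:Int) ≤ 1)]; rfl
  rw [hs, pvFoldl_append_map]
  simp only [List.singleton_append]
  rw [pvJoin_cons]
  have htl : ("\n" ++ indent).toList = '\n' :: indent.toList := by simp
  rw [htl]
  have hm := pvMain indent.toList docstring.toList
  simp only [List.append_nil] at hm
  rw [← hm]
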